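-- pv_equiv track=rewrite | github.com/PavelAntipov39/OAP | scripts/visual_explainer_oap.py | filter_rows_by_artifacts
-- ===== SOURCE A (Python) =====
-- from typing import Iterable, Sequence
--
-- def filter_rows_by_artifacts(rows: Sequence[tuple[str, str]], artifact_prefixes: Sequence[str]) -> list[tuple[str, str]]:
--     prefixes = [prefix.strip().lstrip("./").rstrip("/") for prefix in artifact_prefixes if prefix.strip()]
--     if not prefixes:
--         return list(rows)
--
--     filtered: list[tuple[str, str]] = []
--     for status, path in rows:
--         normalized = path.strip().lstrip("./")
--         for prefix in prefixes:
--             if normalized == prefix or normalized.startswith(prefix + "/"):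
--                 filtered.append((status, path))
--                 break
--     return filtered
-- ===== SOURCE B (Python) =====
-- def filter_rows_by_artifacts(rows, artifact_prefixes):
--     # Hash-set of normalized prefixes; each row is decided by probing its own
--     # slash-boundary ancestors against the set (O(path components) per row,
--     # independent of the number of prefixes), instead of scanning all prefixes.
--     prefix_set = {p.strip().lstrip("./").rstrip("/") for p in artifact_prefixes if p.strip()}
--     if not prefix_set:
--         return list(rows)
--     filtered = []
--     for status, path in rows:
--         n = path.strip().lstrip("./")
--         if n in prefix_set or any(n[:i] in prefix_set for i in range(len(n)) if n[i] == "/"):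
--             filtered.append((status, path))
--     return filtered
-- ===== Notes on version B (the rewrite author's own statement) =====
-- stated objective: faster
-- what changed: B builds a hash set of the normalized prefixes once and decides each row by membership-testing the row path's slash-boundary ancestors, instead of A's inner scan over all prefixes with equality/startswith per prefix.
import Mathlib
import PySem

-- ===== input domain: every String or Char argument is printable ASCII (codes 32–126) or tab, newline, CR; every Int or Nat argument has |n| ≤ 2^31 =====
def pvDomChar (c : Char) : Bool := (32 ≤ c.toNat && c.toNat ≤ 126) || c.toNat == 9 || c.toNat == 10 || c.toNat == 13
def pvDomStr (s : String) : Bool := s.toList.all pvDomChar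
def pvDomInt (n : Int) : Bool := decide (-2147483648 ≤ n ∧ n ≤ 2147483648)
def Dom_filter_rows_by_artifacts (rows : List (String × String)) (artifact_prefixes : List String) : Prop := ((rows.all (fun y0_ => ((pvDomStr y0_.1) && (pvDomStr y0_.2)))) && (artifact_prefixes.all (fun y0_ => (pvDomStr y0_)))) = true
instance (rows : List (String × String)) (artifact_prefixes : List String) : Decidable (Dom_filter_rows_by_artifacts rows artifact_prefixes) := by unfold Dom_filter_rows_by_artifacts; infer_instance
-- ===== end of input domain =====

-- B replaces A's inner scan over all prefixes by one probe of each slash-boundary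
-- ancestor of the row's path against a set of the normalized prefixes (objective: faster, measured).

-- ===== PORT A =====
-- s.lstrip("./") — ported by hand (exact: drops leading chars belonging to {'.', '/'})
def pvLstripDotSlash (cs : List Char) : List Char :=
  cs.dropWhile (fun c => c == '.' || c == '/')

-- s.rstrip("/") — ported by hand (exact: drops trailing '/' chars)
def pvRstripSlash (cs : List Char) : List Char :=
  (cs.reverse.dropWhile (fun c => c == '/')).reverse

-- prefix.strip().lstrip("./").rstrip("/")
def pvNormPrefix (s : String) : List Char :=
  pvRstripSlash (pvLstripDotSlash (PySem.Chars.strip s.toList))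

-- path.strip().lstrip("./")
def pvNormPath (s : String) : List Char :=
  pvLstripDotSlash (PySem.Chars.strip s.toList)

def filter_rows_by_artifacts (rows : List (String × String)) (artifact_prefixes : List String) : List (String × String) :=
  let prefixes : List (List Char) :=
    (artifact_prefixes.filter (fun p => !(PySem.Chars.strip p.toList).isEmpty)).map pvNormPrefix
  if prefixes.isEmpty then rows
  else
    rows.foldl (fun filtered row =>
      let normalized := pvNormPath row.2
      -- inner 'for prefix in prefixes: … break' appends the row once iff some prefix matches
      if prefixes.any (fun pre => normalized == pre || PySem.Chars.startswith normalized (pre ++ ['/'])) then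
        filtered ++ [row]
      else filtered) []

-- ===== PORT B =====
-- membership of the ancestor n[:i] (i a '/' position) or of n itself in the prefix set
def pvAncestorMatch (pset : List (List Char)) (n : List Char) : Bool :=
  pset.contains n ||
    (List.range n.length).any (fun i => n.getD i ' ' == '/' && pset.contains (n.take i))

def filter_rows_by_artifacts_alt (rows : List (String × String)) (artifact_prefixes : List String) : List (String × String) :=
  let prefix_set : PySem.Set (List Char) :=
    PySem.Set.ofList ((artifact_prefixes.filter (fun p => !(PySem.Chars.strip p.toList).isEmpty)).map pvNormPrefix)
  if prefix_set.isEmpty then rows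
  else
    rows.foldl (fun filtered row =>
      if pvAncestorMatch prefix_set (pvNormPath row.2) then filtered ++ [row] else filtered) []

-- ===== PRECONDITION & SPEC =====
def Spec_filter_rows_by_artifacts (rows : List (String × String)) (artifact_prefixes : List String) (out : List (String × String)) : Prop := out = filter_rows_by_artifacts_alt rows artifact_prefixes
instance (rows : List (String × String)) (artifact_prefixes : List String) (out : List (String × String)) : Decidable (Spec_filter_rows_by_artifacts rows artifact_prefixes out) := by unfold Spec_filter_rows_by_artifacts; infer_instance

-- ===== CLAIM (what is proved, stated in full; the proofs are below) =====
def Claim_equal_filter_rows_by_artifacts : Prop := ∀ (rows : List (String × String)) (artifact_prefixes : List String), Dom_filter_rows_by_artifacts rows artifact_prefixes → Spec_filter_rows_by_artifacts rows artifact_prefixes (filter_rows_by_artifacts rows artifact_prefixes)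

-- ===== LEMMAS AND PROOFS =====

-- (pre ++ ['/']) is a prefix of n iff some '/' position i of n has n[:i] = pre
lemma pvPrefix_slash_iff (pre n : List Char) :
    (pre ++ ['/']) <+: n ↔ ∃ i < n.length, n[i]?.getD ' ' = '/' ∧ n.take i = pre := by
  constructor
  · rintro ⟨t, ht⟩
    have ht' : pre ++ '/' :: t = n := by simpa using ht
    refine ⟨pre.length, ?_, ?_, ?_⟩
    · rw [← ht']; simp
    · rw [← ht']; simp
    · rw [← ht']; simp
  · rintro ⟨i, hi, hc, hp⟩
    have h1 : n.take (i+1) = n.take i ++ ['/'] := by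
      rw [List.take_add_one, List.getElem?_eq_getElem hi]
      rw [List.getElem?_eq_getElem hi] at hc
      simp at hc
      simp [hc]
    rw [← hp, ← h1]
    exact List.take_prefix _ _

-- the per-row predicates of the two ports agree
lemma pvPred_eq (ps : List (List Char)) (n : List Char) :
    ps.any (fun pre => n == pre || PySem.Chars.startswith n (pre ++ ['/']))
      = pvAncestorMatch (PySem.Set.ofList ps) n := by
  rw [Bool.eq_iff_iff]
  simp only [pvAncestorMatch, List.any_eq_true, Bool.or_eq_true, beq_iff_eq,
    List.contains_eq_mem, decide_eq_true_eq, List.mem_range, Bool.and_eq_true,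
    PySem.Chars.startswith_iff, PySem.Set.mem_ofList, List.getD]
  constructor
  · rintro ⟨pre, hmem, h | h⟩
    · exact Or.inl (h ▸ hmem)
    · rcases (pvPrefix_slash_iff pre n).1 h with ⟨i, hi, hc, hp⟩
      exact Or.inr ⟨i, hi, hc, hp ▸ hmem⟩
  · rintro (h | ⟨i, hi, hc, hmem⟩)
    · exact ⟨n, h, Or.inl rfl⟩
    · exact ⟨n.take i, hmem, Or.inr ((pvPrefix_slash_iff _ n).2 ⟨i, hi, hc, rfl⟩)⟩

lemma pvOfList_isEmpty (l : List (List Char)) :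
    (PySem.Set.ofList l).isEmpty = l.isEmpty := by
  cases l with
  | nil => rfl
  | cons x xs =>
    have hx : x ∈ PySem.Set.ofList (x :: xs) := (PySem.Set.mem_ofList _ _).2 List.mem_cons_self
    cases hofl : PySem.Set.ofList (x :: xs) with
    | nil => rw [hofl] at hx; cases hx
    | cons y ys => simp
-- ===== VERDICT (by name: the statement is the Claim_ definition above) =====
theorem filter_rows_by_artifacts_spec : Claim_equal_filter_rows_by_artifacts := by
  intro rows artifact_prefixes _
  unfold Spec_filter_rows_by_artifacts filter_rows_by_artifacts filter_rows_by_artifacts_alt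
  simp only [pvOfList_isEmpty]
  set ps := (artifact_prefixes.filter (fun p => !(PySem.Chars.strip p.toList).isEmpty)).map pvNormPrefix with hps
  by_cases h : ps.isEmpty
  · simp [h]
  · simp only [h, if_false, Bool.false_eq_true]
    have hf : (fun (filtered : List (String × String)) row =>
        let normalized := pvNormPath row.2
        if ps.any (fun pre => normalized == pre || PySem.Chars.startswith normalized (pre ++ ['/'])) then
          filtered ++ [row]
        else filtered)
      = (fun filtered row =>
        if pvAncestorMatch (PySem.Set.ofList ps) (pvNormPath row.2) then filtered ++ [row] else filtered) := by
      funext filtered row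
      simp only [pvPred_eq]
    rw [hf]
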